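-- pv_equiv track=rewrite | github.com/pypi-data/pypi-mirror-396 | packages/clippy-code/clippy_code-4.19.4-py3-none-any.whl/clippy/tools/edit_file.py | _find_block_bounds
-- ===== SOURCE A (Python) =====
-- def _find_block_bounds(
--     lines: list[str], start_pattern: str, end_pattern: str
-- ) -> tuple[int, int] | None:
--     """
--     Find the start and end indices of a block in the lines using exact string matching.
--
--     Args:
--         lines: List of file lines (with EOL)
--         start_pattern: Exact text that marks the start of the block
--         end_pattern: Exact text that marks the end of the block
--
--     Returns:
--         Tuple of (start_idx, end_idx) or None if not found
--     """
--     start_idx = None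
--     end_idx = None
--
--     for i, line in enumerate(lines):
--         line_text = line.rstrip("\r\n")
--
--         # Find start pattern (exact substring match)
--         if start_idx is None and start_pattern in line_text:
--             start_idx = i
--             # Check if end pattern is also on the same line
--             if end_pattern in line_text:
--                 end_idx = i
--                 break
--             continue
--
--         # Find end pattern (must come after start)
--         if start_idx is not None and end_pattern in line_text:
--             end_idx = i
--             break
--
--     if start_idx is not None and end_idx is not None:
--         return (start_idx, end_idx)
--     return None
-- ===== SOURCE B (Python) =====
-- def _find_block_bounds(
--     lines: list[str], start_pattern: str, end_pattern: str
-- ) -> tuple[int, int] | None: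
--     """Two find-first passes: locate the start line, then scan (inclusively)
--     from it for the end line. No stateful flags."""
--     start_idx = None
--     for i, line in enumerate(lines):
--         if start_pattern in line.rstrip("\r\n"):
--             start_idx = i
--             break
--     if start_idx is None:
--         return None
--     for j in range(start_idx, len(lines)):
--         if end_pattern in lines[j].rstrip("\r\n"):
--             return (start_idx, j)
--     return None
-- ===== Notes on version B (the rewrite author's own statement) =====
-- stated objective: simpler
-- what changed: Replaces A's single stateful loop (Optional flags, continue, break, post-loop None check) by two independent find-first scans: one for the start line, then one from the start line (inclusive) for the end line.
import Mathlib
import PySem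

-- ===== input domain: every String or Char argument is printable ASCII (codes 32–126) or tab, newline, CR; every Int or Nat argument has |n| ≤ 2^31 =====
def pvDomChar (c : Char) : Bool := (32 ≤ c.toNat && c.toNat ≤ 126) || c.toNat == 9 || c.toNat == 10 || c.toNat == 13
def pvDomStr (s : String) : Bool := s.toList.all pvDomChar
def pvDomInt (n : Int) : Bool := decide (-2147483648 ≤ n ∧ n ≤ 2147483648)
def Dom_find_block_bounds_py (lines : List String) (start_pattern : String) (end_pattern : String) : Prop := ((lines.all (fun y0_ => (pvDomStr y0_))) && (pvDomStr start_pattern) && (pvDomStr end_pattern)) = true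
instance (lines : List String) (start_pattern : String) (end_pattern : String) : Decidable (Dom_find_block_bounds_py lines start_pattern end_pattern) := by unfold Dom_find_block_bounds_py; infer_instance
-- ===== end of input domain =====

-- B replaces A's single stateful flag-driven loop by two independent find-first scans (simpler decomposition; same cost).

-- hand port of line.rstrip("\r\n") (shared by both Pythons): exact — drops trailing '\r'/'\n' characters only
def rstripCRLF (s : List Char) : List Char := (s.reverse.dropWhile (fun c => c == '\r' || c == '\n')).reverse

-- ===== PORT A =====
-- A's loop: state (start_idx, i); break is modelled by returning the final pair
def fbbLoopA (sp ep : List Char) (startIdx : Option Nat) (i : Nat) : List String → Option Nat × Option Nat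
  | [] => (startIdx, none)
  | l :: ls =>
    let t := rstripCRLF l.toList
    match startIdx with
    | none =>
      if PySem.Chars.isIn sp t then
        if PySem.Chars.isIn ep t then (some i, some i)
        else fbbLoopA sp ep (some i) (i+1) ls
      else fbbLoopA sp ep none (i+1) ls
    | some s =>
      if PySem.Chars.isIn ep t then (some s, some i)
      else fbbLoopA sp ep (some s) (i+1) ls

def find_block_bounds_py (lines : List String) (start_pattern : String) (end_pattern : String) : Option (Int × Int) :=
  match fbbLoopA start_pattern.toList end_pattern.toList none 0 lines with
  | (some s, some e) => some ((s : Int), (e : Int))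
  | _ => none

-- ===== PORT B =====
def fbbFindStart (sp : List Char) (i : Nat) : List String → Option Nat
  | [] => none
  | l :: ls => if PySem.Chars.isIn sp (rstripCRLF l.toList) then some i else fbbFindStart sp (i+1) ls

def fbbFindEnd (ep : List Char) (j : Nat) : List String → Option Nat
  | [] => none
  | l :: ls => if PySem.Chars.isIn ep (rstripCRLF l.toList) then some j else fbbFindEnd ep (j+1) ls

def find_block_bounds_py_alt (lines : List String) (start_pattern : String) (end_pattern : String) : Option (Int × Int) :=
  match fbbFindStart start_pattern.toList 0 lines with
  | none => none
  | some s =>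
    match fbbFindEnd end_pattern.toList s (lines.drop s) with
    | none => none
    | some e => some ((s : Int), (e : Int))

-- ===== PRECONDITION & SPEC =====
def Spec_find_block_bounds_py (lines : List String) (start_pattern : String) (end_pattern : String) (out : Option (Int × Int)) : Prop := out = find_block_bounds_py_alt lines start_pattern end_pattern
instance (lines : List String) (start_pattern : String) (end_pattern : String) (out : Option (Int × Int)) : Decidable (Spec_find_block_bounds_py lines start_pattern end_pattern out) := by unfold Spec_find_block_bounds_py; infer_instance

-- ===== CLAIM (what is proved, stated in full; the proofs are below) =====
def Claim_equal_find_block_bounds_py : Prop := ∀ (lines : List String) (start_pattern : String) (end_pattern : String), Dom_find_block_bounds_py lines start_pattern end_pattern → Spec_find_block_bounds_py lines start_pattern end_pattern (find_block_bounds_py lines start_pattern end_pattern)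

-- ===== LEMMAS AND PROOFS =====

-- once the start flag is set, A's loop is exactly B's end scan
theorem fbbLoopA_some (sp ep : List Char) (s : Nat) :
    ∀ (ls : List String) (i : Nat), fbbLoopA sp ep (some s) i ls = (some s, fbbFindEnd ep i ls) := by
  intro ls
  induction ls with
  | nil => intro i; simp [fbbLoopA, fbbFindEnd]
  | cons l ls ih =>
    intro i
    simp only [fbbLoopA, fbbFindEnd]
    split_ifs with h <;> simp [ih]

theorem fbbFindStart_ge (sp : List Char) :
    ∀ (ls : List String) (i s : Nat), fbbFindStart sp i ls = some s → i ≤ s := by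
  intro ls
  induction ls with
  | nil => intro i s h; simp [fbbFindStart] at h
  | cons l ls ih =>
    intro i s h
    simp only [fbbFindStart] at h
    split_ifs at h with hc
    · simp only [Option.some.injEq] at h; omega
    · have := ih (i+1) s h; omega

theorem fbbLoopA_none (sp ep : List Char) :
    ∀ (ls : List String) (i : Nat),
      (match fbbLoopA sp ep none i ls with
       | (some s, some e) => some ((s : Int), (e : Int))
       | _ => none)
      = (match fbbFindStart sp i ls with
         | none => none
         | some s =>
           match fbbFindEnd ep s (ls.drop (s - i)) with
           | none => none
           | some e => some ((s : Int), (e : Int))) := by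
  intro ls
  induction ls with
  | nil => intro i; simp [fbbLoopA, fbbFindStart]
  | cons l ls ih =>
    intro i
    simp only [fbbLoopA, fbbFindStart]
    by_cases hs : PySem.Chars.isIn sp (rstripCRLF l.toList) = true
    · by_cases he : PySem.Chars.isIn ep (rstripCRLF l.toList) = true
      · simp [hs, he, fbbFindEnd]
      · simp only [if_pos hs, if_neg he]
        rw [fbbLoopA_some]
        simp only [fbbFindEnd, if_neg he, Nat.sub_self, List.drop_zero]
        cases fbbFindEnd ep (i+1) ls <;> simp
    · simp only [if_neg hs]
      rw [ih (i+1)]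
      cases hfs : fbbFindStart sp (i+1) ls with
      | none => simp
      | some s =>
        have hge := fbbFindStart_ge sp ls (i+1) s hfs
        have hdrop : (l :: ls).drop (s - i) = ls.drop (s - (i+1)) := by
          have : s - i = (s - (i+1)) + 1 := by omega
          simp [this]
        simp [hdrop]

-- ===== VERDICT (by name: the statement is the Claim_ definition above) =====
theorem find_block_bounds_py_spec : Claim_equal_find_block_bounds_py := by
  intro lines sp ep _
  unfold Spec_find_block_bounds_py find_block_bounds_py find_block_bounds_py_alt
  have h := fbbLoopA_none sp.toList ep.toList lines 0
  simpa using h
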